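-- pv_equiv track=rewrite | github.com/suminbyun/dom_fuzzer | main.py | format_elements_list
-- ===== SOURCE A (Python) =====
-- def format_elements_list(vars, per_line=5):
--     if not vars:
--         return ""
--     lines = []
--     for i in range(0, len(vars), per_line):
--         chunk = ", ".join(vars[i:i + per_line])
--         lines.append(f"    {chunk}")
--     return "const elements = [\n" + ",\n".join(lines) + "\n];\nelements.forEach(e => document.body.appendChild(e));"
-- ===== SOURCE B (Python) =====
-- def format_elements_list(items, per_line=5):
--     # first parameter named 'items' to avoid shadowing the builtin 'vars'
--     if not items:
--         return ""
--     body = ""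
--     for i, v in enumerate(items):
--         if i == 0:
--             sep = "    "
--         elif per_line > 0 and i % per_line == 0:
--             sep = ",\n    "
--         else:
--             sep = ", "
--         body += sep + v
--     return "const elements = [\n" + body + "\n];\nelements.forEach(e => document.body.appendChild(e));"
-- ===== Notes on version B (the rewrite author's own statement) =====
-- stated objective: alternative
-- what changed: B builds the body in one pass over enumerate(vars) with a running string, choosing each element's separator from its index modulo per_line, instead of A's chunking pass over range(0, len, per_line) with per-chunk joins and a list of lines.
-- crash fix: On non-empty vars with per_line == 0 A raises ValueError (range step 0) while B returns the fully formatted list on one line. — e.g. on format_elements_list(["a"], 0): A raises ValueError, B returns "const elements = [\n a\n];\nelements.forEach(e => document.body.appendChild(e));"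
import Mathlib
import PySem

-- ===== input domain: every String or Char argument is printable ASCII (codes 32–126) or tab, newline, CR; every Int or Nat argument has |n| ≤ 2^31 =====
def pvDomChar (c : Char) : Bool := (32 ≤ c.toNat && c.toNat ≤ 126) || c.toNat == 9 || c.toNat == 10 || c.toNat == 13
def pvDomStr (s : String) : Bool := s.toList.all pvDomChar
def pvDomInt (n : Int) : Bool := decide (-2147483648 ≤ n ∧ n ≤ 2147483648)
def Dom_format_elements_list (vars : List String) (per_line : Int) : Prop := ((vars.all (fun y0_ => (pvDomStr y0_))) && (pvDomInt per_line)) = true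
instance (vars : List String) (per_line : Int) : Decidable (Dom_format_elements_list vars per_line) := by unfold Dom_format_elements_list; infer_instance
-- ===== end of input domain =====

-- B formats the list in one pass over enumerate(vars) with a running string and index-modulo
-- separators instead of A's chunking pass over range(0, len, per_line); same cost, different decomposition.

-- ===== PORT A =====
def format_elements_list (vars : List String) (per_line : Int) : String :=
  if vars = [] then ""
  else
    let lines : List String :=
      (PySem.List.pyRange 0 (PySem.List.len vars) per_line).foldl
        (fun lines i =>
          let chunk := PySem.Str.join ", " (PySem.List.slice vars (some i) (some (i + per_line)))
          lines ++ ["    " ++ chunk]) []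
    "const elements = [\n" ++ PySem.Str.join ",\n" lines ++ "\n];\nelements.forEach(e => document.body.appendChild(e));"

-- ===== PORT B =====
def format_elements_list_alt (vars : List String) (per_line : Int) : String :=
  if vars = [] then ""
  else
    let body : String :=
      (PySem.List.enumerate vars).foldl
        (fun body iv =>
          let sep : String :=
            if iv.1 = 0 then "    "
            else if 0 < per_line ∧ PySem.Int.mod iv.1 per_line = 0 then ",\n    "
            else ", "
          body ++ sep ++ iv.2) ""
    "const elements = [\n" ++ body ++ "\n];\nelements.forEach(e => document.body.appendChild(e));"

-- ===== PRECONDITION & SPEC =====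
-- Pre_ restricts to the natural domain: with non-empty vars, per_line = 0 makes A raise
-- ValueError (range step 0), and a negative per_line makes A silently emit an empty body that
-- drops every element — nonsense inputs outside the function's purpose, so per_line ≤ 0 is excluded.
def Pre_format_elements_list (vars : List String) (per_line : Int) : Prop :=
  vars = [] ∨ 1 ≤ per_line
instance (vars : List String) (per_line : Int) : Decidable (Pre_format_elements_list vars per_line) := by
  unfold Pre_format_elements_list; infer_instance

def pvWitness_format_elements_list : List String × Int := (["a", "b", "c"], 2)

-- On non-empty vars with per_line = 0 A raises ValueError (range() step must not be zero) while B returns the formatted list on one line.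
def Raises_format_elements_list (vars : List String) (per_line : Int) : Prop :=
  vars ≠ [] ∧ per_line = 0
instance (vars : List String) (per_line : Int) : Decidable (Raises_format_elements_list vars per_line) := by
  unfold Raises_format_elements_list; infer_instance
def pvRaiseWitness_format_elements_list : List String × Int := (["a"], 0)
def pvRaiseWitnessOut_format_elements_list : String :=
  "const elements = [\n    a\n];\nelements.forEach(e => document.body.appendChild(e));"

def Spec_format_elements_list (vars : List String) (per_line : Int) (out : String) : Prop :=
  out = format_elements_list_alt vars per_line
instance (vars : List String) (per_line : Int) (out : String) : Decidable (Spec_format_elements_list vars per_line out) := by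
  unfold Spec_format_elements_list; infer_instance

-- ===== CLAIM (what is proved, stated in full; the proofs are below) =====
def Claim_equal_format_elements_list : Prop := ∀ (vars : List String) (per_line : Int), Dom_format_elements_list vars per_line → Pre_format_elements_list vars per_line → Spec_format_elements_list vars per_line (format_elements_list vars per_line)

def Claim_raises_format_elements_list : Prop := (∀ (vars : List String) (per_line : Int), Dom_format_elements_list vars per_line → Raises_format_elements_list vars per_line → ¬ Pre_format_elements_list vars per_line) ∧ (Dom_format_elements_list (pvRaiseWitness_format_elements_list.1) (pvRaiseWitness_format_elements_list.2) ∧ Raises_format_elements_list (pvRaiseWitness_format_elements_list.1) (pvRaiseWitness_format_elements_list.2) ∧ format_elements_list_alt (pvRaiseWitness_format_elements_list.1) (pvRaiseWitness_format_elements_list.2) = pvRaiseWitnessOut_format_elements_list)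

-- ===== LEMMAS AND PROOFS =====

-- the separator B writes before the element of index i
def sepFn (p i : Int) : String :=
  if i = 0 then "    " else if 0 < p ∧ PySem.Int.mod i p = 0 then ",\n    " else ", "

-- ", "-separated continuation of a line
def tailcat : List String → String
  | [] => ""
  | v :: c => ", " ++ v ++ tailcat c

-- B's inner body (the fold of the port, with the separator factored out)
def bodyB (p : Int) (vars : List String) : String :=
  (PySem.List.enumerate vars).foldl (fun b iv => b ++ (sepFn p iv.1 ++ iv.2)) ""

-- one of A's lines
def lineA (p : Int) (vars : List String) (i : Int) : String :=
  "    " ++ PySem.Str.join ", " (PySem.List.slice vars (some i) (some (i + p)))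

-- A's inner body
def bodyA (p : Int) (vars : List String) : String :=
  PySem.Str.join ",\n" ((PySem.List.pyRange 0 (PySem.List.len vars) p).map (lineA p vars))

-- string-level join lemmas (derived from the Chars-level ones)
lemma str_join_singleton (sep x : String) : PySem.Str.join sep [x] = x := by
  apply String.toList_inj.mp
  simp [PySem.Str.toList_join, PySem.Chars.join_singleton]

lemma str_join_cons_cons (sep x y : String) (l : List String) :
    PySem.Str.join sep (x :: y :: l) = x ++ sep ++ PySem.Str.join sep (y :: l) := by
  apply String.toList_inj.mp
  simp [PySem.Str.toList_join, PySem.Chars.join_cons_cons]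

lemma join_comma (v : String) (c : List String) :
    PySem.Str.join ", " (v :: c) = v ++ tailcat c := by
  induction c generalizing v with
  | nil => simp [str_join_singleton, tailcat, String.append_empty]
  | cons w c ih => rw [str_join_cons_cons, ih, tailcat]; simp [String.append_assoc]

-- pyRange with a positive step: head, shift and nil decompositions
lemma pyRange_cons_of_pos {s : Int} (hs : 0 < s) {a b : Int} (hab : a < b) :
    PySem.List.pyRange a b s = a :: PySem.List.pyRange (a + s) b s := by
  rw [PySem.List.pyRange_of_pos _ _ hs, PySem.List.pyRange_of_pos _ _ hs]
  by_cases h : a + s < b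
  · have hm : ((b - a + s - 1) / s).toNat = ((b - (a + s) + s - 1) / s).toNat + 1 := by
      have e : b - a + s - 1 = (b - (a + s) + s - 1) + 1 * s := by ring
      rw [e, Int.add_mul_ediv_right _ _ (by omega)]
      have h0 : 0 ≤ (b - (a + s) + s - 1) / s := Int.ediv_nonneg (by omega) (by omega)
      omega
    rw [if_pos hab, if_pos h, hm, List.range_succ_eq_map]
    simp only [List.map_cons, List.map_map]
    congr 1
    · norm_num
    · apply List.map_congr_left
      intro k _
      simp
      ring
  · have hm : ((b - a + s - 1) / s).toNat = 1 := by
      have e : (b - a + s - 1) / s = 1 := by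
        rw [← PySem.Int.floordiv_eq_ediv_of_pos hs, PySem.Int.floordiv_eq_iff_of_pos hs]
        omega
      omega
    rw [if_pos hab, if_neg (by omega : ¬ a + s < b), hm]
    simp

lemma pyRange_shift_of_pos {s : Int} (hs : 0 < s) (a b : Int) :
    PySem.List.pyRange (a + s) b s = (PySem.List.pyRange a (b - s) s).map (· + s) := by
  rw [PySem.List.pyRange_of_pos _ _ hs, PySem.List.pyRange_of_pos _ _ hs, List.map_map]
  have hm : (if a + s < b then ((b - (a + s) + s - 1) / s).toNat else 0)
      = (if a < b - s then ((b - s - a + s - 1) / s).toNat else 0) := by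
    by_cases h : a + s < b
    · rw [if_pos h, if_pos (by omega), show b - (a + s) + s - 1 = b - s - a + s - 1 from by ring]
    · rw [if_neg h, if_neg (by omega)]
  rw [hm]
  apply List.map_congr_left
  intro k _
  simp
  ring

lemma pyRange_nil_of_pos {s : Int} (hs : 0 < s) {a b : Int} (h : b ≤ a) :
    PySem.List.pyRange a b s = [] := by
  rw [PySem.List.pyRange_of_pos _ _ hs, if_neg (by omega)]
  simp

-- factor a fold that only appends to its accumulator
lemma foldl_str_prefix (g : Int × String → String) (l : List (Int × String)) :
    ∀ (b : String), l.foldl (fun acc iv => acc ++ g iv) b = b ++ l.foldl (fun acc iv => acc ++ g iv) "" := by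
  induction l with
  | nil => intro b; simp [String.append_empty]
  | cons x l ih =>
      intro b
      simp only [List.foldl_cons]
      rw [ih (b ++ g x), ih ("" ++ g x), String.empty_append, String.append_assoc]

-- the fold only sees indices through sepFn: equal separators ⇒ equal folds
lemma foldl_enum_congr (p : Int) (ys : List String) :
    ∀ (s t : Int) (b : String), (∀ k : Nat, k < ys.length → sepFn p (s + k) = sepFn p (t + k)) →
    (PySem.List.enumerate ys s).foldl (fun b iv => b ++ (sepFn p iv.1 ++ iv.2)) b =
    (PySem.List.enumerate ys t).foldl (fun b iv => b ++ (sepFn p iv.1 ++ iv.2)) b := by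
  induction ys with
  | nil => intro s t b _; simp [PySem.List.enumerate]
  | cons y ys ih =>
      intro s t b h
      rw [PySem.List.enumerate_cons, PySem.List.enumerate_cons]
      simp only [List.foldl_cons]
      have h0 : sepFn p s = sepFn p t := by
        have := h 0 (by simp)
        simpa using this
      rw [h0]
      apply ih
      intro k hk
      have h1 := h (k + 1) (by simpa using Nat.succ_lt_succ hk)
      push_cast at h1 ⊢
      rw [show s + 1 + (k : Int) = s + ((k : Int) + 1) from by ring,
        show t + 1 + (k : Int) = t + ((k : Int) + 1) from by ring]
      exact h1

-- inside a chunk every separator is ", "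
lemma chunk_tail {p : Int} (hp : 0 < p) (c : List String) :
    ∀ (s : Int) (b : String), 1 ≤ s → s + c.length ≤ p →
    (PySem.List.enumerate c s).foldl (fun b iv => b ++ (sepFn p iv.1 ++ iv.2)) b = b ++ tailcat c := by
  induction c with
  | nil => intro s b _ _; simp [PySem.List.enumerate, tailcat, String.append_empty]
  | cons v c ih =>
      intro s b hs hlen
      rw [PySem.List.enumerate_cons]
      simp only [List.foldl_cons]
      have hsep : sepFn p s = ", " := by
        unfold sepFn
        rw [if_neg (by omega), if_neg ?_]
        rintro ⟨-, hm⟩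
        rw [PySem.Int.mod_eq_emod_of_pos hp, Int.emod_eq_of_lt (by omega) (by simp at hlen; omega)] at hm
        omega
      rw [hsep, ih (s + 1) _ (by omega) (by simp at hlen ⊢; omega)]
      rw [tailcat, String.append_assoc, String.append_assoc]

lemma bodyB_small {p : Int} (hp : 0 < p) (v : String) (c : List String)
    (hlen : (v :: c).length ≤ p.toNat) :
    bodyB p (v :: c) = "    " ++ (v ++ tailcat c) := by
  unfold bodyB
  rw [PySem.List.enumerate_cons]
  simp only [List.foldl_cons]
  have h0 : sepFn p 0 = "    " := by unfold sepFn; simp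
  rw [h0, String.empty_append, show (0 : Int) + 1 = 1 from by norm_num,
    chunk_tail hp c 1 _ (by omega) (by simp at hlen; omega), String.append_assoc]

lemma bodyB_shift {p : Int} (hp : 0 < p) {s : Int} (hs : 0 < s) (hd : p ∣ s)
    (y : String) (ys : List String) (b : String) :
    (PySem.List.enumerate (y :: ys) s).foldl (fun b iv => b ++ (sepFn p iv.1 ++ iv.2)) b =
    b ++ (",\n" ++ bodyB p (y :: ys)) := by
  rw [PySem.List.enumerate_cons]
  simp only [List.foldl_cons]
  have hm0 : PySem.Int.mod s p = 0 := by
    rw [PySem.Int.mod_eq_emod_of_pos hp]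
    exact Int.emod_eq_zero_of_dvd hd
  have hsep : sepFn p s = ",\n    " := by
    unfold sepFn
    rw [if_neg (by omega), if_pos ⟨hp, hm0⟩]
  rw [hsep]
  rw [foldl_enum_congr p ys (s + 1) 1 _ ?shift]
  case shift =>
    intro k hk
    unfold sepFn
    obtain ⟨q, rfl⟩ := hd
    have h1 : ¬ (p * q + 1 + (k : Int) = 0) := by positivity
    have h2 : ¬ ((1 : Int) + (k : Int) = 0) := by positivity
    rw [if_neg h1, if_neg h2]
    have : PySem.Int.mod (p * q + 1 + (k : Int)) p = PySem.Int.mod (1 + (k : Int)) p := by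
      rw [PySem.Int.mod_eq_emod_of_pos hp, PySem.Int.mod_eq_emod_of_pos hp,
        show p * q + 1 + (k : Int) = 1 + (k : Int) + p * q from by ring,
        Int.add_mul_emod_self_left]
    rw [this]
  rw [foldl_str_prefix]
  unfold bodyB
  rw [PySem.List.enumerate_cons]
  simp only [List.foldl_cons]
  have h0 : sepFn p 0 = "    " := by unfold sepFn; simp
  rw [h0, String.empty_append, foldl_str_prefix _ _ ("    " ++ y)]
  simp only [String.append_assoc]
  rw [show (",\n    " : String) = ",\n" ++ "    " from by decide, String.append_assoc,
    show (0 : Int) + 1 = 1 from by norm_num]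

lemma line0_eq {p : Int} (hp : 0 < p) (vars : List String) :
    lineA p vars 0 = "    " ++ PySem.Str.join ", " (vars.take p.toNat) := by
  unfold lineA
  rw [PySem.List.slice_zero_start, show (0 : Int) + p = p from by ring,
    PySem.List.slice_to vars (by omega)]

lemma bodyA_small {p : Int} (hp : 0 < p) (vars : List String) (hne : vars ≠ [])
    (hlen : vars.length ≤ p.toNat) :
    bodyA p vars = "    " ++ PySem.Str.join ", " vars := by
  unfold bodyA
  have hn : (0 : Int) < PySem.List.len vars := by
    simp [PySem.List.len_eq]
    exact List.length_pos_iff.mpr hne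
  rw [pyRange_cons_of_pos hp hn, pyRange_nil_of_pos hp (by simp [PySem.List.len_eq]; omega)]
  simp only [List.map_cons, List.map_nil]
  rw [str_join_singleton, line0_eq hp, List.take_of_length_le hlen]

lemma bodyA_rec {p : Int} (hp : 0 < p) (vars : List String)
    (hlen : p.toNat < vars.length) :
    bodyA p vars = ("    " ++ PySem.Str.join ", " (vars.take p.toNat)) ++
      (",\n" ++ bodyA p (vars.drop p.toNat)) := by
  unfold bodyA
  have hn : (0 : Int) < PySem.List.len vars := by simp [PySem.List.len_eq]; omega
  have hpn : p < PySem.List.len vars := by simp [PySem.List.len_eq]; omega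
  rw [pyRange_cons_of_pos hp hn, show (0 : Int) + p = p from by ring,
    show PySem.List.pyRange p (PySem.List.len vars) p
       = PySem.List.pyRange (0 + p) (PySem.List.len vars) p from by norm_num,
    pyRange_shift_of_pos hp 0 (PySem.List.len vars)]
  simp only [List.map_cons, List.map_map]
  have hshift : ((PySem.List.pyRange 0 (PySem.List.len vars - p) p).map (lineA p vars ∘ (· + p)))
      = (PySem.List.pyRange 0 (PySem.List.len (vars.drop p.toNat)) p).map (lineA p (vars.drop p.toNat)) := by
    rw [show PySem.List.len (vars.drop p.toNat) = PySem.List.len vars - p from by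
      simp [PySem.List.len_eq]; omega]
    apply List.map_congr_left
    intro i hi
    have h0i : 0 ≤ i := by
      rcases (PySem.List.mem_pyRange_iff_of_pos hp i).mp hi with ⟨h1, -, -⟩
      omega
    simp only [Function.comp_apply]
    unfold lineA
    rw [PySem.List.slice_toNat vars (by omega) (by omega),
      PySem.List.slice_toNat _ (by omega) (by omega), List.drop_drop]
    have e1 : (i + p + p).toNat - (i + p).toNat = (i + p).toNat - i.toNat := by omega
    have e2 : (i + p).toNat = p.toNat + i.toNat := by omega
    rw [e1, e2]
  rw [hshift]
  have hd : vars.drop p.toNat ≠ [] := by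
    intro h
    have := congrArg List.length h
    simp at this
    omega
  have hn' : (0 : Int) < PySem.List.len (vars.drop p.toNat) := by
    simp [PySem.List.len_eq]
    omega
  rw [pyRange_cons_of_pos hp hn']
  simp only [List.map_cons]
  rw [str_join_cons_cons, line0_eq hp, String.append_assoc]

lemma bodyA_eq_bodyB {p : Int} (hp : 0 < p) :
    ∀ (vars : List String), vars ≠ [] → bodyA p vars = bodyB p vars := by
  have main : ∀ (n : Nat) (vars : List String), vars.length ≤ n → vars ≠ [] →
      bodyA p vars = bodyB p vars := by
    intro n
    induction n with
    | zero => intro vars h hne; cases vars <;> simp_all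
    | succ n ih =>
        intro vars hlen hne
        match vars, hne with
        | v :: c, _ =>
          by_cases hsmall : (v :: c).length ≤ p.toNat
          · rw [bodyA_small hp _ (by simp) hsmall, bodyB_small hp v c hsmall, join_comma]
          · push_neg at hsmall
            have hs' : p.toNat < c.length + 1 := by simpa using hsmall
            rw [bodyA_rec hp _ hsmall]
            have htd := List.take_append_drop p.toNat (v :: c)
            have htake_len : ((v :: c).take p.toNat).length = p.toNat := by
              simp
              omega
            have hdrop_ne : (v :: c).drop p.toNat ≠ [] := by
              intro h
              have := congrArg List.length h
              simp at this
              omega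
            -- B side: split the enumeration at the chunk boundary
            conv_rhs => rw [bodyB, ← htd, PySem.List.enumerate_append, List.foldl_append]
            obtain ⟨tv, tc, htvc⟩ : ∃ tv tc, (v :: c).take p.toNat = tv :: tc := by
              cases h : (v :: c).take p.toNat with
              | nil => rw [h] at htake_len; simp at htake_len; omega
              | cons a b => exact ⟨a, b, rfl⟩
            obtain ⟨dv, dc, hdvc⟩ : ∃ dv dc, (v :: c).drop p.toNat = dv :: dc := by
              cases h : (v :: c).drop p.toNat with
              | nil => exact absurd h hdrop_ne
              | cons a b => exact ⟨a, b, rfl⟩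
            rw [htvc, hdvc]
            have hC1 : List.foldl (fun b iv => b ++ (sepFn p iv.1 ++ iv.2)) ""
                (PySem.List.enumerate (tv :: tc) 0) = "    " ++ (tv ++ tailcat tc) := by
              have := bodyB_small hp tv tc (by rw [← htvc, htake_len])
              simpa [bodyB] using this
            have hstart : (0 : Int) + ((tv :: tc).length : Int) = p := by
              rw [← htvc, htake_len]
              omega
            rw [hC1, hstart]
            rw [bodyB_shift hp hp (dvd_refl p) dv dc]
            have hlen' : c.length + 1 ≤ n + 1 := by simpa using hlen
            rw [← hdvc, ← ih _ (by simp; omega) hdrop_ne]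
            rw [join_comma]
  intro vars hne
  exact main vars.length vars le_rfl hne

-- the port of B computes bodyB (separator factored out, appends reassociated)
lemma alt_fun_eq (p : Int) :
    (fun (body : String) (iv : Int × String) =>
      body ++ (if iv.1 = 0 then "    "
               else if 0 < p ∧ PySem.Int.mod iv.1 p = 0 then ",\n    " else ", ") ++ iv.2)
    = fun (b : String) (iv : Int × String) => b ++ (sepFn p iv.1 ++ iv.2) := by
  funext b iv
  rw [String.append_assoc]
  rfl

-- ===== VERDICT (by name: the statement is the Claim_ definition above) =====
theorem format_elements_list_spec : Claim_equal_format_elements_list := by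
  intro vars p _ hpre
  unfold Spec_format_elements_list
  by_cases h : vars = []
  · subst h; rfl
  · have hp : (0 : Int) < p := by
      rcases hpre with h' | h'
      · exact absurd h' h
      · omega
    simp only [format_elements_list, format_elements_list_alt, if_neg h]
    rw [show (fun (lines : List String) (i : Int) =>
          lines ++ ["    " ++ PySem.Str.join ", " (PySem.List.slice vars (some i) (some (i + p)))])
        = fun (lines : List String) (i : Int) => lines ++ [lineA p vars i] from rfl,
      PySem.List.foldl_append_singleton_eq_map (lineA p vars), List.nil_append, alt_fun_eq p]
    have key := bodyA_eq_bodyB hp vars h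
    unfold bodyA bodyB at key
    rw [key]

def format_elements_list_raises : Claim_raises_format_elements_list := by
  unfold Claim_raises_format_elements_list
  exact ⟨by rintro vars p _ ⟨h1, h2⟩ (h3 | h4) <;> simp_all, by decide⟩
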